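-- pv_equiv track=rewrite | github.com/Joeltronics/Omakase | utils.py | add_numbers_to_duplicate_names
-- ===== SOURCE A (Python) =====
-- from collections import Counter
-- from collections.abc import Collection, Iterable, Sequence
-- from typing import Tuple, List, Optional, Set
--
-- def add_numbers_to_duplicate_names(player_names: Sequence[str]) -> List[str]:
-- 	player_names_count = Counter(player_names)
-- 	name_numbers = {name: 1 for name, count in player_names_count.items() if count > 1}
--
-- 	ret = []
-- 	for name in player_names:
-- 		if name in name_numbers:
-- 			ret.append(f'{name} {name_numbers[name]}')
-- 			name_numbers[name] += 1
-- 		else: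
-- 			ret.append(name)
--
-- 	# Could run into problems if passed in a name already ending with a number
-- 	# e.g.: ["Player", "Player", "Player 1"] would end up with duplicate: ["Player 1", "Player 2", "Player 1"]
-- 	# TODO: handle this case
-- 	if len(ret) != len(set(ret)):
-- 		raise ValueError(f'Invalid player names: {player_names}')
--
-- 	return ret
-- ===== SOURCE B (Python) =====
-- def add_numbers_to_duplicate_names(player_names):
-- 	indices = {}
-- 	for idx, name in enumerate(player_names):
-- 		indices.setdefault(name, []).append(idx)
--
-- 	ret = list(player_names)
-- 	for name, idxs in indices.items():
-- 		if len(idxs) > 1: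
-- 			for i, idx in enumerate(idxs):
-- 				ret[idx] = f'{name} {i + 1}'
--
-- 	if len(ret) != len(set(ret)):
-- 		raise ValueError(f'Invalid player names: {player_names}')
--
-- 	return ret
-- ===== Notes on version B (the rewrite author's own statement) =====
-- stated objective: alternative
-- what changed: B replaces A's Counter-plus-streaming-counter loop by building a name-to-index-list map in one pass and then assigning 'name i' in place at each index of every duplicated name; the final duplicate check is kept. Pre_ excludes inputs on which the disambiguated list still contains duplicates, where A (and B) raise ValueError.
import Mathlib
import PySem

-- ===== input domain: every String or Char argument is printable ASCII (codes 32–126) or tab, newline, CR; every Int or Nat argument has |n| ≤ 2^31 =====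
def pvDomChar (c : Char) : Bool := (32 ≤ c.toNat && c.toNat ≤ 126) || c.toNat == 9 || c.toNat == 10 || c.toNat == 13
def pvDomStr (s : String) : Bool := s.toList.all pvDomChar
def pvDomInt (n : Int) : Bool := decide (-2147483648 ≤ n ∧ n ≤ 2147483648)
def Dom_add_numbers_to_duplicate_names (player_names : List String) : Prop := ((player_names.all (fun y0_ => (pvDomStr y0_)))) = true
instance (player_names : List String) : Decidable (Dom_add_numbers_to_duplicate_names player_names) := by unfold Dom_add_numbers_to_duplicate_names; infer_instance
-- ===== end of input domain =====

-- B builds a name → index-list map once and writes 'name i' in place at each index of a duplicated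
-- name, instead of A's streaming per-name running counter (alternative decomposition, same cost).

-- ===== PORT A =====
-- Port of A. The final `if len(ret) != len(set(ret)): raise ValueError` is a pure check: inputs on
-- which it fires are excluded by Pre_, so the port returns `ret` there too.
def add_numbers_to_duplicate_names (player_names : List String) : List String :=
  let player_names_count := PySem.Dict.counter player_names
  let name_numbers : PySem.Dict String Int :=
    player_names_count.items.foldl
      (fun d p => if 1 < p.2 then d.insert p.1 (1 : Int) else d) PySem.Dict.empty
  let st := player_names.foldl
    (fun (st : List String × PySem.Dict String Int) name =>
      if st.2.contains name then
        (st.1 ++ [name ++ " " ++ PySem.Int.toStr (st.2.getD name 0)],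
         st.2.insert name (st.2.getD name 0 + 1))
      else
        (st.1 ++ [name], st.2))
    (([] : List String), name_numbers)
  st.1

-- ===== PORT B =====
-- Port of Source B. `indices.setdefault(name, []).append(idx)` is Dict.modify with default [];
-- `ret[idx] = …` is List.set (indices from enumerate are ≥ 0, so .toNat is exact).
-- The final duplicate check raises exactly where A's does; those inputs are excluded by Pre_.
def add_numbers_to_duplicate_names_alt (player_names : List String) : List String :=
  let indices : PySem.Dict String (List Int) :=
    (PySem.List.enumerate player_names).foldl
      (fun d p => d.modify p.2 [] (fun l => l ++ [p.1])) PySem.Dict.empty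
  let ret := indices.items.foldl
    (fun (ret : List String) p =>
      if 1 < p.2.length then
        (PySem.List.enumerate p.2).foldl
          (fun r q => r.set q.2.toNat (p.1 ++ " " ++ PySem.Int.toStr (q.1 + 1))) ret
      else ret)
    player_names
  ret

-- ===== PRECONDITION & SPEC =====
-- Declarative description of the disambiguated list (pointwise, no port recursion): position k of a
-- duplicated name s becomes 's (1 + occurrences of s before k)', other positions are unchanged.
def pvRename (xs : List String) : List String :=
  (List.range xs.length).map (fun k =>
    let s := xs.getD k ""
    if 1 < xs.count s then s ++ " " ++ PySem.Int.toStr (1 + ((xs.take k).count s : Int)) else s)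

-- Pre_ excludes exactly the inputs on which the disambiguated list still contains a duplicate
-- (e.g. ["P", "P", "P 1"]): there Python A raises ValueError (and so does B).
def Pre_add_numbers_to_duplicate_names (player_names : List String) : Prop :=
  (pvRename player_names).Nodup
instance (player_names : List String) : Decidable (Pre_add_numbers_to_duplicate_names player_names) := by
  unfold Pre_add_numbers_to_duplicate_names; infer_instance

def pvWitness_add_numbers_to_duplicate_names : List String := ["Alice", "Bob", "Alice"]

def Spec_add_numbers_to_duplicate_names (player_names : List String) (out : List String) : Prop := out = add_numbers_to_duplicate_names_alt player_names
instance (player_names : List String) (out : List String) : Decidable (Spec_add_numbers_to_duplicate_names player_names out) := by unfold Spec_add_numbers_to_duplicate_names; infer_instance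

-- ===== CLAIM (what is proved, stated in full; the proofs are below) =====
def Claim_equal_add_numbers_to_duplicate_names : Prop := ∀ (player_names : List String), Dom_add_numbers_to_duplicate_names player_names → Pre_add_numbers_to_duplicate_names player_names → Spec_add_numbers_to_duplicate_names player_names (add_numbers_to_duplicate_names player_names)

-- ===== LEMMAS AND PROOFS =====

theorem pv_nn_getD (l : List String) (P : String → Prop) [DecidablePred P] (d : PySem.Dict String Int) (n : String) :
    (l.foldl (fun d k => if P k then d.insert k (1 : Int) else d) d).getD n 0
    = if n ∈ l ∧ P n then 1 else d.getD n 0 := by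
  induction l generalizing d with
  | nil => simp
  | cons a l ih =>
    simp only [List.foldl_cons, ih, List.mem_cons]
    by_cases ha : P a <;> by_cases hn : n = a <;>
      simp [ha, hn, PySem.Dict.getD_insert]


theorem pv_nn_contains (l : List String) (P : String → Prop) [DecidablePred P] (d : PySem.Dict String Int) (n : String) :
    (l.foldl (fun d k => if P k then d.insert k (1 : Int) else d) d).contains n
    = ((decide (n ∈ l ∧ P n)) || d.contains n) := by
  induction l generalizing d with
  | nil => simp
  | cons a l ih =>
    simp only [List.foldl_cons, ih, List.mem_cons]
    by_cases ha : P a <;> by_cases hn : n = a <;>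
      simp [ha, hn, PySem.Dict.contains_insert, Bool.or_comm, Bool.or_left_comm]

theorem pv_loopA (xs : List String) (l : List String) (r : List String)
    (nn : PySem.Dict String Int)
    (hc : ∀ n, nn.contains n = decide (1 < xs.count n)) :
    (l.foldl (fun (st : List String × PySem.Dict String Int) name =>
      if st.2.contains name then
        (st.1 ++ [name ++ " " ++ PySem.Int.toStr (st.2.getD name 0)],
         st.2.insert name (st.2.getD name 0 + 1))
      else (st.1 ++ [name], st.2)) (r, nn)).1
    = r ++ (List.range l.length).map (fun k =>
        let s := l.getD k ""
        if 1 < xs.count s then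
          s ++ " " ++ PySem.Int.toStr (nn.getD s 0 + ((l.take k).count s : Int))
        else s) := by
  induction l generalizing r nn with
  | nil => simp
  | cons a l ih =>
    simp only [List.foldl_cons, hc]
    by_cases ha : 1 < xs.count a
    · rw [if_pos (by simp [ha])]
      rw [ih _ _ (by intro n; by_cases hn : n = a <;>
            simp [hn, PySem.Dict.contains_insert, hc, ha])]
      simp only [List.length_cons, List.range_succ_eq_map, List.map_cons, List.map_map]
      simp only [List.append_assoc, List.singleton_append]
      congr 1
      simp only [List.cons.injEq, List.map_inj_left, List.mem_range]
      refine ⟨by simp [ha], ?_⟩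
      intro k hk
      simp only [Function.comp_apply, List.getElem?_cons_succ, List.take_succ_cons,
        List.getD_eq_getElem?_getD]
      by_cases hcnt : 1 < xs.count (l[k]?.getD "")
      · rw [if_pos hcnt, if_pos hcnt]
        rw [PySem.Dict.getD_insert]
        by_cases hs : l[k]?.getD "" = a
        · rw [if_pos hs, hs]
          congr 2
          rw [List.count_cons]
          simp only [BEq.rfl, if_pos]
          push_cast
          ring
        · rw [if_neg hs]
          congr 2
          rw [List.count_cons]
          simp [Ne.symm hs]
      · rw [if_neg hcnt, if_neg hcnt]
    · rw [if_neg (by simp [ha])]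
      rw [ih _ _ hc]
      simp only [List.length_cons, List.range_succ_eq_map, List.map_cons, List.map_map]
      simp only [List.append_assoc, List.singleton_append]
      congr 1
      simp only [List.cons.injEq, List.map_inj_left, List.mem_range]
      refine ⟨by simp [ha], ?_⟩
      intro k hk
      simp only [Function.comp_apply, List.getElem?_cons_succ, List.take_succ_cons,
        List.getD_eq_getElem?_getD]
      by_cases hcnt : 1 < xs.count (l[k]?.getD "")
      · rw [if_pos hcnt, if_pos hcnt]
        have hs : ¬ l[k]?.getD "" = a := fun h => ha (h ▸ hcnt)
        congr 2
        rw [List.count_cons]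
        simp [Ne.symm hs]
      · rw [if_neg hcnt, if_neg hcnt]

theorem pv_nn_char (xs : List String) (n : String) :
    ((PySem.Set.ofList xs : List String).foldl
      (fun d k => if (1 : Int) < ((xs.count k : Nat) : Int) then d.insert k (1 : Int) else d)
      PySem.Dict.empty).contains n = decide (1 < xs.count n) := by
  rw [pv_nn_contains _ (fun k => (1 : Int) < ((xs.count k : Nat) : Int))]
  simp only [PySem.Dict.contains_empty, Bool.or_false, decide_eq_decide]
  constructor
  · rintro ⟨_, h⟩
    exact_mod_cast h
  · intro h
    exact ⟨(PySem.Set.mem_ofList xs n).mpr (List.count_pos_iff.mp (by omega)), by exact_mod_cast h⟩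

def pvPositions (s : String) (xs : List String) : List Nat :=
  (List.range xs.length).filter (fun k => xs.getD k "" == s)

theorem pv_enumerate_cons {α : Type} (a : α) (l : List α) (t : Int) :
    PySem.List.enumerate (a :: l) t = (t, a) :: PySem.List.enumerate l (t + 1) := by
  simp [PySem.List.enumerate]

theorem pv_positions_cons (s a : String) (l : List String) :
    pvPositions s (a :: l)
    = (if a == s then [0] else []) ++ (pvPositions s l).map Nat.succ := by
  unfold pvPositions
  rw [List.length_cons, List.range_succ_eq_map, List.filter_cons]
  by_cases h : a = s <;>
    simp [h, List.filter_map, Function.comp_def]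

theorem pv_positions_mem (s : String) (xs : List String) (j : Nat) :
    j ∈ pvPositions s xs ↔ j < xs.length ∧ xs.getD j "" = s := by
  unfold pvPositions
  simp [List.mem_filter]

theorem pv_positions_nodup (s : String) (xs : List String) :
    (pvPositions s xs).Nodup := List.Nodup.filter _ List.nodup_range

theorem pv_positions_length (s : String) (xs : List String) :
    (pvPositions s xs).length = xs.count s := by
  induction xs with
  | nil => simp [pvPositions]
  | cons a l ih =>
    rw [pv_positions_cons, List.count_cons, List.length_append, List.length_map, ih]
    by_cases h : a = s <;> simp [h] <;> omega

theorem pv_idxOf_map_succ (P : List Nat) (j : Nat) :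
    ((P.map Nat.succ).idxOf (j + 1)) = P.idxOf j := by
  induction P with
  | nil => simp
  | cons a P ih =>
    simp only [List.map_cons, List.idxOf_cons, ih]
    by_cases h : a = j <;> simp [h]

theorem pv_positions_idxOf (s : String) (xs : List String) (j : Nat)
    (hs : xs.getD j "" = s) (hj : j < xs.length) :
    (pvPositions s xs).idxOf j = (xs.take j).count s := by
  induction xs generalizing j with
  | nil => simp at hj
  | cons a l ih =>
    rw [pv_positions_cons]
    cases j with
    | zero =>
      simp only [List.getD_cons_zero] at hs
      simp [hs]
    | succ j =>
      simp only [List.getD_cons_succ] at hs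
      have hj' : j < l.length := by simpa using hj
      rw [List.take_succ_cons, List.count_cons]
      by_cases h : a = s
      · rw [if_pos (by simp [h]), List.singleton_append, List.idxOf_cons]
        rw [show ((0:Nat) == j + 1) = false by simp]
        simp only [cond_false]
        rw [pv_idxOf_map_succ, ih j hs hj']
        simp [h]
      · rw [if_neg (by simp [h]), List.nil_append, pv_idxOf_map_succ, ih j hs hj']
        simp [h]

theorem pv_enum_filter (xs : List String) (s : String) (t : Int) :
    ((PySem.List.enumerate xs t).filter (fun p => p.2 == s)).map (·.1)
    = (pvPositions s xs).map (fun k : Nat => ((k : Int) + t)) := by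
  induction xs generalizing t with
  | nil => simp [PySem.List.enumerate, pvPositions]
  | cons a l ih =>
    rw [pv_enumerate_cons, List.filter_cons, pv_positions_cons]
    by_cases h : a = s
    · simp only [h, BEq.rfl, if_pos, List.map_cons, ih, List.singleton_append,
        List.map_map]
      refine congrArg₂ _ (by simp) ?_
      apply List.map_congr_left
      intro k _
      simp only [Function.comp_apply]
      push_cast
      ring
    · simp only [show (a == s) = false by simp [h], Bool.false_eq_true, if_neg,
        not_false_iff, ih, List.nil_append, List.map_map]
      apply List.map_congr_left
      intro k _
      simp only [Function.comp_apply]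
      push_cast
      ring

theorem pv_setfold_len {β : Type} (l : List β) (f : β → Nat) (g : β → String)
    (r : List String) :
    (l.foldl (fun r q => r.set (f q) (g q)) r).length = r.length := by
  induction l generalizing r with
  | nil => rfl
  | cons a l ih => rw [List.foldl_cons, ih, List.length_set]

theorem pv_inner (name : String) (P : List Nat) (hnd : P.Nodup) (r : List String)
    (t : Int) (j : Nat) :
    ((PySem.List.enumerate (P.map (fun k : Nat => (k : Int))) t).foldl
      (fun r q => r.set q.2.toNat (name ++ " " ++ PySem.Int.toStr (q.1 + 1))) r)[j]?
    = if j ∈ P ∧ j < r.length then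
        some (name ++ " " ++ PySem.Int.toStr (t + (P.idxOf j : Int) + 1))
      else r[j]? := by
  induction P generalizing r t with
  | nil => simp
  | cons a P ih =>
    rw [List.map_cons, pv_enumerate_cons, List.foldl_cons]
    have hnd' := hnd.of_cons
    have haP : a ∉ P := (List.nodup_cons.mp hnd).1
    rw [ih hnd' _ (t + 1)]
    by_cases hjP : j ∈ P
    · have hja : ¬ a = j := fun h => haP (h ▸ hjP)
      by_cases hjr : j < r.length
      · rw [if_pos ⟨hjP, by rw [List.length_set]; exact hjr⟩,
          if_pos ⟨List.mem_cons_of_mem _ hjP, hjr⟩]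
        rw [List.idxOf_cons, show (a == j) = false by simp [hja], cond_false]
        congr 2
        push_cast
        ring
      · rw [if_neg (by rw [List.length_set]; tauto), if_neg (by tauto)]
        rw [List.getElem?_set]
        simp [hja]
    · rw [if_neg (by tauto)]
      simp only [Int.toNat_natCast]
      rw [List.getElem?_set]
      by_cases hja : j = a
      · subst hja
        rw [if_pos rfl]
        by_cases hjr : j < r.length
        · rw [if_pos hjr, if_pos ⟨List.mem_cons_self, hjr⟩, List.idxOf_cons,
            show (j == j) = true by simp, cond_true]
          congr 2
          push_cast
          ring
        · rw [if_neg hjr, if_neg (fun h => hjr h.2)]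
          exact (List.getElem?_eq_none (by omega)).symm
      · rw [if_neg (fun h => hja h.symm)]
        rw [if_neg (by simp [hja, hjP])]

theorem pv_outer (xs : List String) (ks : List String) (hnd : ks.Nodup)
    (r : List String) (hlen : r.length = xs.length) (j : Nat) (hj : j < xs.length) :
    (ks.foldl (fun r k =>
      if 1 < ((pvPositions k xs).map (fun i : Nat => (i : Int))).length then
        (PySem.List.enumerate ((pvPositions k xs).map (fun i : Nat => (i : Int)))).foldl
          (fun r q => r.set q.2.toNat (k ++ " " ++ PySem.Int.toStr (q.1 + 1))) r
      else r) r)[j]?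
    = if xs.getD j "" ∈ ks ∧ 1 < xs.count (xs.getD j "") then
        some (xs.getD j "" ++ " " ++
          PySem.Int.toStr (1 + ((xs.take j).count (xs.getD j "") : Int)))
      else r[j]? := by
  induction ks generalizing r with
  | nil => simp
  | cons k ks ih =>
    have hcnt_eq : ((pvPositions k xs).map (fun i : Nat => (i : Int))).length = xs.count k := by
      rw [List.length_map, pv_positions_length]
    rw [List.foldl_cons]
    by_cases hc : 1 < ((pvPositions k xs).map (fun i : Nat => (i : Int))).length
    · rw [if_pos hc]
      rw [ih hnd.of_cons _ (by rw [pv_setfold_len]; exact hlen) ]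
      by_cases hsk : xs.getD j "" ∈ ks ∧ 1 < xs.count (xs.getD j "")
      · rw [if_pos hsk, if_pos ⟨List.mem_cons_of_mem _ hsk.1, hsk.2⟩]
      · rw [if_neg hsk]
        rw [pv_inner _ _ (pv_positions_nodup k xs) _ _ j]
        by_cases hjk : j ∈ pvPositions k xs
        · obtain ⟨_, hgd⟩ := (pv_positions_mem k xs j).mp hjk
          rw [if_pos ⟨hjk, by rw [hlen]; exact hj⟩]
          rw [if_pos ⟨by rw [hgd]; exact List.mem_cons_self,
            by rw [hgd]; rw [hcnt_eq] at hc; exact hc⟩]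
          rw [hgd, pv_positions_idxOf k xs j hgd hj]
          congr 2
          push_cast
          ring
        · rw [if_neg (by tauto)]
          have hne : ¬ xs.getD j "" = k := fun h =>
            hjk ((pv_positions_mem k xs j).mpr ⟨hj, h⟩)
          rw [if_neg (by
            rintro ⟨hmem, hcount⟩
            rcases List.mem_cons.mp hmem with h | h
            · exact hne h
            · exact hsk ⟨h, hcount⟩)]
    · rw [if_neg hc]
      rw [ih hnd.of_cons r hlen]
      rw [hcnt_eq] at hc
      by_cases hsk : xs.getD j "" ∈ ks ∧ 1 < xs.count (xs.getD j "")
      · rw [if_pos hsk, if_pos ⟨List.mem_cons_of_mem _ hsk.1, hsk.2⟩]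
      · rw [if_neg hsk]
        rw [if_neg (by
          rintro ⟨hmem, hcount⟩
          rcases List.mem_cons.mp hmem with h | h
          · exact hc (h ▸ hcount)
          · exact hsk ⟨h, hcount⟩)]

theorem pv_enum_map_snd {α : Type} (l : List α) (t : Int) :
    (PySem.List.enumerate l t).map (·.2) = l := by
  induction l generalizing t <;> simp [PySem.List.enumerate, *]

theorem pv_indices_getD (xs : List String) (k : String) :
    ((PySem.List.enumerate xs).foldl
      (fun d p => d.modify p.2 [] (fun l => l ++ [p.1])) PySem.Dict.empty).getD k []
    = (pvPositions k xs).map (fun i : Nat => (i : Int)) := by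
  have h1 : (PySem.List.enumerate xs).foldl
      (fun d p => d.modify p.2 [] (fun l => l ++ [p.1])) PySem.Dict.empty
      = ((PySem.List.enumerate xs).map (fun p => (p.2, p.1))).foldl
        (fun d p => d.modify p.1 [] (fun l => l ++ [p.2])) PySem.Dict.empty := by
    rw [List.foldl_map]
  rw [h1, PySem.Dict.getD_foldl_modify_append]
  rw [List.filter_map, List.map_map]
  have h2 : ((PySem.List.enumerate xs).filter
      ((fun p => p.1 == k) ∘ (fun p => (p.2, p.1)))).map ((·.2) ∘ (fun p => (p.2, p.1)))
      = ((PySem.List.enumerate xs).filter (fun p => p.2 == k)).map (·.1) := rfl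
  rw [h2, pv_enum_filter]
  simp

theorem pv_indices_items (xs : List String) :
    ((PySem.List.enumerate xs).foldl
      (fun d p => d.modify p.2 [] (fun l => l ++ [p.1])) PySem.Dict.empty).items
    = (PySem.Set.ofList xs : List String).map
        (fun k => (k, (pvPositions k xs).map (fun i : Nat => (i : Int)))) := by
  have hkeys : ((PySem.List.enumerate xs).foldl
      (fun d p => d.modify p.2 [] (fun l => l ++ [p.1])) PySem.Dict.empty).keys
      = PySem.Set.ofList xs := by
    rw [PySem.Dict.keys_foldl_modify_key]
    rw [pv_enum_map_snd]
    rfl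
  have hnod : ((PySem.List.enumerate xs).foldl
      (fun d p => d.modify p.2 [] (fun l => l ++ [p.1])) PySem.Dict.empty).keys.Nodup := by
    rw [hkeys]; exact PySem.Set.nodup_ofList xs
  rw [PySem.Dict.items_eq_map_keys _ hnod [], hkeys]
  apply List.map_congr_left
  intro k _
  rw [pv_indices_getD]

theorem pv_outerfold_len (xs : List String) (ks : List String) (r : List String) :
    (ks.foldl (fun r k =>
      if 1 < ((pvPositions k xs).map (fun i : Nat => (i : Int))).length then
        (PySem.List.enumerate ((pvPositions k xs).map (fun i : Nat => (i : Int)))).foldl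
          (fun r q => r.set q.2.toNat (k ++ " " ++ PySem.Int.toStr (q.1 + 1))) r
      else r) r).length = r.length := by
  induction ks generalizing r with
  | nil => rfl
  | cons k ks ih =>
    rw [List.foldl_cons]
    by_cases hc : 1 < ((pvPositions k xs).map (fun i : Nat => (i : Int))).length
    · rw [if_pos hc, ih, pv_setfold_len]
    · rw [if_neg hc, ih]

theorem portA_eq_pvRename (xs : List String) :
    add_numbers_to_duplicate_names xs = pvRename xs := by
  unfold add_numbers_to_duplicate_names
  simp only [PySem.Dict.items_counter, List.foldl_map]
  rw [pv_loopA xs xs [] _ (pv_nn_char xs)]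
  unfold pvRename
  simp only [List.nil_append, List.map_inj_left, List.mem_range]
  intro k hk
  by_cases hcnt : 1 < xs.count (xs.getD k "")
  · rw [if_pos hcnt, if_pos hcnt]
    congr 2
    rw [pv_nn_getD _ (fun k => (1 : Int) < ((xs.count k : Nat) : Int))]
    rw [if_pos ⟨(PySem.Set.mem_ofList xs _).mpr
      (List.count_pos_iff.mp (by omega)), by exact_mod_cast hcnt⟩]
  · rw [if_neg hcnt, if_neg hcnt]

theorem portB_eq_pvRename (xs : List String) :
    add_numbers_to_duplicate_names_alt xs = pvRename xs := by
  unfold add_numbers_to_duplicate_names_alt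
  dsimp only
  rw [pv_indices_items, List.foldl_map]
  apply List.ext_getElem?
  intro j
  by_cases hj : j < xs.length
  · rw [pv_outer xs _ (PySem.Set.nodup_ofList xs) xs rfl j hj]
    have hgd : xs.getD j "" = xs[j] := by
      rw [List.getD_eq_getElem?_getD, List.getElem?_eq_getElem hj]
      rfl
    have hmem : xs.getD j "" ∈ (PySem.Set.ofList xs : List String) :=
      (PySem.Set.mem_ofList xs _).mpr (hgd ▸ List.getElem_mem hj)
    unfold pvRename
    rw [List.getElem?_map, List.getElem?_range hj]
    simp only [Option.map_some]
    by_cases hcnt : 1 < xs.count (xs.getD j "")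
    · rw [if_pos ⟨hmem, hcnt⟩, if_pos hcnt]
    · rw [if_neg (fun h => hcnt h.2), if_neg hcnt]
      rw [List.getElem?_eq_getElem hj, hgd]
  · have h1 : xs.length ≤ j := by omega
    rw [List.getElem?_eq_none (by rw [pv_outerfold_len]; exact h1),
      List.getElem?_eq_none (by unfold pvRename; simp; exact h1)]

-- ===== VERDICT (by name: the statement is the Claim_ definition above) =====
theorem add_numbers_to_duplicate_names_spec : Claim_equal_add_numbers_to_duplicate_names := by
  intro xs _ _
  unfold Spec_add_numbers_to_duplicate_names
  rw [portA_eq_pvRename, portB_eq_pvRename]
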